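-- pv_equiv track=rewrite | github.com/karthikbmk/Information-Retrieval | Ranking/searcher.py | create_champion_index
-- ===== SOURCE A (Python) =====
-- from collections import defaultdict
-- import heapq
--
-- def create_champion_index(index, threshold=10):
--     """
--     Create an index mapping each term to its champion list, defined as the
--     documents with the K highest tf-idf values for that term (the
--     threshold parameter determines K).
--
--     In the example below, the champion list for term 'a' contains
--     documents 1 and 2; the champion list for term 'b' contains documents 0
--     and 1.
--
--     >>> champs = Index().create_champion_index({'a': [[0, 10], [1, 20], [2,15]], 'b': [[0, 20], [1, 15], [2, 10]]}, 2)
--     >>> champs['a']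
--     [[1, 20], [2, 15]]
--     """
--     ###TODO
--     final_index = defaultdict(lambda : [])
--     K = threshold
--
--     for term,doc_tf_idf_list in index.items():
--         heap = [(doc_tf_idf[1]*-1,doc_tf_idf[0]) for doc_tf_idf in doc_tf_idf_list]
--         heapq.heapify(heap)
--
--         while(K !=0 and len(heap) != 0):
--             temp_list = heapq.heappop(heap)
--             final_index[term].append([temp_list[1],temp_list[0]*-1])
--             K -= 1
--         K = threshold
--
--     return final_index
-- ===== SOURCE B (Python) =====
-- from collections import defaultdict
--
--
-- def create_champion_index(index, threshold=10):
--     final_index = defaultdict(list)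
--     for term, doc_tf_idf_list in index.items():
--         ordered = sorted(doc_tf_idf_list, key=lambda d: (-d[1], d[0]))
--         for d in ordered[:threshold]:
--             final_index[term].append([d[0], d[1]])
--     return final_index
-- ===== Notes on version B (the rewrite author's own statement) =====
-- stated objective: simpler
-- what changed: Replaces the per-term heapify + counted heappop drain with a single sorted() by key (-tfidf, doc_id) and a plain slice ordered[:threshold]; Pre_ restricts to the natural domain of nonnegative thresholds (A drains every document when threshold < 0, an accident of its 'while K != 0' loop) and to postings of length >= 2 (A raises IndexError on shorter ones).
-- outside the precondition, e.g. on create_champion_index({'a': [[0, 10], [1, 20]]}, -1): A returns {'a': [[1, 20], [0, 10]]}, B returns {'a': [[1, 20]]}; on create_champion_index({'a': [[5]]}, 2): A raises IndexError, B raises IndexError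
import Mathlib
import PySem

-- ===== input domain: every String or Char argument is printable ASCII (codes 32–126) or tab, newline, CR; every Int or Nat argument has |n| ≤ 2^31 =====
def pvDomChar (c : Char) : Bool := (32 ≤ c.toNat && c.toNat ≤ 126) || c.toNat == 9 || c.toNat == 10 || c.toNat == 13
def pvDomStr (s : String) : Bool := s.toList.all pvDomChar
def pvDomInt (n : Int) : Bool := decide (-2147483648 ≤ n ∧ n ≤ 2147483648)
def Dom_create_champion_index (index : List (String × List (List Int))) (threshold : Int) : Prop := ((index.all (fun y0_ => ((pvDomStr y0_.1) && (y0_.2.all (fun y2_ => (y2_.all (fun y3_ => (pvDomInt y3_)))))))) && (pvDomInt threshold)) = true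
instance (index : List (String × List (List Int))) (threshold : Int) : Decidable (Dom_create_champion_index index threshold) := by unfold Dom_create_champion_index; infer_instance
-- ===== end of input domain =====

-- B replaces A's per-term heapify + counted heappop drain with one sorted-by-key pass and a slice (objective: simpler).

-- ===== PORT A =====
-- heapq as a priority queue: popMin extracts a minimal tuple (lexicographic on (Int × Int),
-- exactly heapq's tuple order; tied tuples are equal values, so which one is removed is immaterial).
def popMin : List (Int × Int) → Option ((Int × Int) × List (Int × Int))
  | [] => none
  | x :: xs =>
    match popMin xs with
    | none => some (x, [])
    | some (m, rest) =>
      if x.1 < m.1 ∨ (x.1 = m.1 ∧ x.2 ≤ m.2) then some (x, xs) else some (m, x :: rest)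

theorem popMin_length : ∀ (l : List (Int × Int)) (p), popMin l = some p → p.2.length < l.length := by
  intro l
  induction l with
  | nil => intro p h; simp [popMin] at h
  | cons x xs ih =>
    intro p h
    cases hx : popMin xs with
    | none =>
      simp only [popMin, hx] at h
      cases h
      simp
    | some q =>
      obtain ⟨m, rest⟩ := q
      simp only [popMin, hx] at h
      split_ifs at h <;> (injection h with h'; subst h') <;> simp
      simpa using ih (m, rest) hx

-- the `while K != 0 and len(heap) != 0` drain loop of A
def drain (K : Int) (l : List (Int × Int)) : List (List Int) :=
  if K = 0 then []
  else
    match h : popMin l with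
    | none => []
    | some (m, rest) => [m.2, -m.1] :: drain (K - 1) rest
termination_by l.length
decreasing_by exact popMin_length l (m, rest) h

def create_champion_index (index : List (String × List (List Int))) (threshold : Int) : List (String × List (List Int)) :=
  (index.foldl
    (fun (fi : PySem.Dict String (List (List Int))) tp =>
      let heap := tp.2.map (fun d => (-(PySem.List.pyGetD d 1 0), PySem.List.pyGetD d 0 0))
      (drain threshold heap).foldl
        (fun fi e => fi.modify tp.1 [] (fun cur => cur ++ [e])) fi)
    PySem.Dict.empty).items

-- ===== PORT B =====
def create_champion_index_alt (index : List (String × List (List Int))) (threshold : Int) : List (String × List (List Int)) :=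
  (index.foldl
    (fun (fi : PySem.Dict String (List (List Int))) tp =>
      let ordered := PySem.List.sorted2 tp.2 (fun d => -(PySem.List.pyGetD d 1 0)) (fun d => PySem.List.pyGetD d 0 0)
      (PySem.List.slice ordered none (some threshold)).foldl
        (fun fi d => fi.modify tp.1 [] (fun cur => cur ++ [[PySem.List.pyGetD d 0 0, PySem.List.pyGetD d 1 0]])) fi)
    PySem.Dict.empty).items

-- ===== PRECONDITION & SPEC =====
-- Pre_ restricts to the function's natural domain: a nonnegative document count K (for threshold < 0
-- A's `while K != 0` loop never terminates at K and accidentally drains every document), and postings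
-- [doc_id, tfidf] of length ≥ 2 (on shorter ones Python A raises IndexError).
def Pre_create_champion_index (index : List (String × List (List Int))) (threshold : Int) : Prop :=
  0 ≤ threshold ∧ ∀ tp ∈ index, ∀ d ∈ tp.2, 2 ≤ d.length
instance (index : List (String × List (List Int))) (threshold : Int) : Decidable (Pre_create_champion_index index threshold) := by unfold Pre_create_champion_index; infer_instance

def pvWitness_create_champion_index : (List (String × List (List Int))) × Int :=
  ([("a", [[0, 10], [1, 20], [2, 15]]), ("b", [[0, 20], [1, 15], [2, 10]])], 2)

def Spec_create_champion_index (index : List (String × List (List Int))) (threshold : Int) (out : List (String × List (List Int))) : Prop := out = create_champion_index_alt index threshold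
instance (index : List (String × List (List Int))) (threshold : Int) (out : List (String × List (List Int))) : Decidable (Spec_create_champion_index index threshold out) := by unfold Spec_create_champion_index; infer_instance

-- ===== CLAIM (what is proved, stated in full; the proofs are below) =====
def Claim_equal_create_champion_index : Prop := ∀ (index : List (String × List (List Int))) (threshold : Int), Dom_create_champion_index index threshold → Pre_create_champion_index index threshold → Spec_create_champion_index index threshold (create_champion_index index threshold)

-- ===== LEMMAS AND PROOFS =====

-- the tf-idf key A pushes on the heap and B sorts by
def pvF (d : List Int) : Int × Int := (-(PySem.List.pyGetD d 1 0), PySem.List.pyGetD d 0 0)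

-- the full pop sequence of the heap (selection sort via popMin)
def selSort (l : List (Int × Int)) : List (Int × Int) :=
  match h : popMin l with
  | none => []
  | some (m, rest) => m :: selSort rest
termination_by l.length
decreasing_by exact popMin_length l (m, rest) h

theorem popMin_eq_none_iff (l : List (Int × Int)) : popMin l = none ↔ l = [] := by
  cases l with
  | nil => simp [popMin]
  | cons x xs =>
    cases hx : popMin xs with
    | none => simp [popMin, hx]
    | some q => obtain ⟨m, rest⟩ := q; simp only [popMin, hx]; split_ifs <;> simp

theorem popMin_perm (l : List (Int × Int)) (m : Int × Int) (rest : List (Int × Int))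
    (h : popMin l = some (m, rest)) : (m :: rest).Perm l := by
  induction l generalizing m rest with
  | nil => simp [popMin] at h
  | cons x xs ih =>
    cases hx : popMin xs with
    | none =>
      have hxs : xs = [] := (popMin_eq_none_iff xs).mp hx
      simp only [popMin, hx] at h
      cases h
      simp [hxs]
    | some q =>
      obtain ⟨m2, rest2⟩ := q
      simp only [popMin, hx] at h
      split_ifs at h <;> (simp only [Option.some.injEq, Prod.mk.injEq] at h; obtain ⟨h1, h2⟩ := h; subst h1; subst h2)
      · exact List.Perm.refl _
      · exact (List.Perm.swap x m2 rest2).trans ((ih m2 rest2 hx).cons x)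

theorem popMin_min (l : List (Int × Int)) (m : Int × Int) (rest : List (Int × Int))
    (h : popMin l = some (m, rest)) : ∀ y ∈ l, toLex m ≤ toLex y := by
  induction l generalizing m rest with
  | nil => simp [popMin] at h
  | cons x xs ih =>
    cases hx : popMin xs with
    | none =>
      have hxs : xs = [] := (popMin_eq_none_iff xs).mp hx
      simp only [popMin, hx] at h
      cases h
      simp [hxs]
    | some q =>
      obtain ⟨m2, rest2⟩ := q
      have hrec := ih m2 rest2 hx
      simp only [popMin, hx] at h
      split_ifs at h with hc <;>
        (simp only [Option.some.injEq, Prod.mk.injEq] at h; obtain ⟨h1, h2⟩ := h; subst h1; subst h2) <;>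
        intro y hy <;> rcases List.mem_cons.mp hy with rfl | hy
      · exact le_refl _
      · refine le_trans ?_ (hrec y hy)
        simp only [Prod.Lex.le_iff, ofLex_toLex]
        exact hc
      · simp only [Prod.Lex.le_iff, ofLex_toLex]
        omega
      · exact hrec y hy

theorem selSort_perm (l : List (Int × Int)) : (selSort l).Perm l := by
  induction hn : l.length using Nat.strong_induction_on generalizing l with
  | _ n ih =>
    rw [selSort.eq_def]
    cases hx : popMin l with
    | none => simp [(popMin_eq_none_iff l).mp hx]
    | some q =>
      obtain ⟨m, rest⟩ := q
      subst hn
      have hlen := popMin_length l (m, rest) hx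
      exact ((ih rest.length hlen rest rfl).cons m).trans (popMin_perm l m rest hx)

theorem selSort_pairwise (l : List (Int × Int)) :
    (selSort l).Pairwise (fun a b => toLex a ≤ toLex b) := by
  induction hn : l.length using Nat.strong_induction_on generalizing l with
  | _ n ih =>
    rw [selSort.eq_def]
    cases hx : popMin l with
    | none => simp
    | some q =>
      obtain ⟨m, rest⟩ := q
      subst hn
      have hlen := popMin_length l (m, rest) hx
      refine List.Pairwise.cons ?_ (ih rest.length hlen rest rfl)
      intro b hb
      have hbl : b ∈ l :=
        (popMin_perm l m rest hx).subset (List.mem_cons_of_mem m ((selSort_perm rest).subset hb))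
      exact popMin_min l m rest hx b hbl

theorem drain_eq_nonneg (K : Int) (hK : 0 ≤ K) (l : List (Int × Int)) :
    drain K l = ((selSort l).take K.toNat).map (fun m => [m.2, -m.1]) := by
  induction hn : l.length using Nat.strong_induction_on generalizing K l with
  | _ n ih =>
    rw [drain.eq_def, selSort.eq_def]
    by_cases hK0 : K = 0
    · simp [hK0]
    · simp only [hK0, if_false]
      cases hx : popMin l with
      | none => simp
      | some q =>
        obtain ⟨m, rest⟩ := q
        subst hn
        have hlen := popMin_length l (m, rest) hx
        have hrec := ih rest.length hlen (K - 1) (by omega) rest rfl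
        have h3 : K.toNat = (K - 1).toNat + 1 := by omega
        simp only [hrec, h3]
        rw [List.take_succ_cons]
        simp

theorem sorted2_eq_sorted_lex {α : Type} (xs : List α) (k1 k2 : α → Int) :
    PySem.List.sorted2 xs k1 k2 false = PySem.List.sorted xs (fun x => toLex (k1 x, k2 x)) false := by
  have hbf : (fun a b => decide (k1 a < k1 b) || (!decide (k1 b < k1 a) && decide (k2 a < k2 b)))
      = (fun a b : α => decide (toLex (k1 a, k2 a) < toLex (k1 b, k2 b))) := by
    funext a b
    rw [Bool.eq_iff_iff]
    simp only [Bool.or_eq_true, Bool.and_eq_true, Bool.not_eq_eq_eq_not, Bool.not_true,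
      decide_eq_true_eq, decide_eq_false_iff_not, Prod.Lex.lt_iff, ofLex_toLex]
    omega
  unfold PySem.List.sorted2 PySem.List.sorted
  simp only [Bool.false_eq_true, if_false, hbf]

theorem mapF_sorted2 (docs : List (List Int)) :
    (PySem.List.sorted2 docs (fun d => -(PySem.List.pyGetD d 1 0)) (fun d => PySem.List.pyGetD d 0 0) false).map pvF
      = selSort (docs.map pvF) := by
  refine PySem.List.eq_of_perm_of_pairwise_le_of_injective (fun p : Int × Int => toLex p)
    (fun a b h => by simpa using congrArg ofLex h) ?_ ?_ ?_
  · exact ((PySem.List.sorted2_perm docs _ _ false).map pvF).trans (selSort_perm _).symm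
  · rw [sorted2_eq_sorted_lex, List.pairwise_map]
    exact PySem.List.sorted_pairwise docs _
  · exact selSort_pairwise _

theorem term_eq (docs : List (List Int)) (K : Int) (hK : 0 ≤ K) :
    drain K (docs.map (fun d => (-(PySem.List.pyGetD d 1 0), PySem.List.pyGetD d 0 0)))
      = (PySem.List.slice
          (PySem.List.sorted2 docs (fun d => -(PySem.List.pyGetD d 1 0)) (fun d => PySem.List.pyGetD d 0 0) false)
          none (some K)).map
          (fun d => [PySem.List.pyGetD d 0 0, PySem.List.pyGetD d 1 0]) := by
    have hcast : K = ((K.toNat : Nat) : Int) := by omega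
    rw [hcast, PySem.List.slice_to_natCast]
    show drain _ (docs.map pvF) = _
    rw [drain_eq_nonneg _ (by omega), ← mapF_sorted2, ← List.map_take, List.map_map]
    refine List.map_congr_left (fun d _ => ?_)
    simp [pvF]

-- ===== VERDICT (by name: the statement is the Claim_ definition above) =====
theorem create_champion_index_spec : Claim_equal_create_champion_index := by
  intro index threshold _ hpre
  unfold Spec_create_champion_index create_champion_index create_champion_index_alt
  congr 1
  have hstep :
      (fun (fi : PySem.Dict String (List (List Int))) (tp : String × List (List Int)) =>
        (drain threshold (tp.2.map (fun d => (-(PySem.List.pyGetD d 1 0), PySem.List.pyGetD d 0 0)))).foldl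
          (fun fi e => fi.modify tp.1 [] (fun cur => cur ++ [e])) fi)
      = (fun (fi : PySem.Dict String (List (List Int))) (tp : String × List (List Int)) =>
        (PySem.List.slice
            (PySem.List.sorted2 tp.2 (fun d => -(PySem.List.pyGetD d 1 0)) (fun d => PySem.List.pyGetD d 0 0))
            none (some threshold)).foldl
          (fun fi d => fi.modify tp.1 [] (fun cur => cur ++ [[PySem.List.pyGetD d 0 0, PySem.List.pyGetD d 1 0]])) fi) := by
    funext fi tp
    rw [term_eq tp.2 threshold hpre.1, List.foldl_map]
  exact congrArg (fun f => List.foldl f PySem.Dict.empty index) hstep
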